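-- pv_equiv track=rewrite | github.com/Ghqlq/NYU-CS1134 | HWs/hw4/gb2789_hw4_q6.py | appearances
-- ===== SOURCE A (Python) =====
-- def appearances(s,low, high):
--     if low == high:
--         return {s[low]:1}
--     dictionary = appearances(s, low+1, high)
--     if s[low] not in dictionary:
--         dictionary[s[low]] = 1
--         return dictionary
--     else:
--         dictionary[s[low]] += 1
--     return dictionary
-- ===== SOURCE B (Python) =====
-- def appearances(s, low, high):
--     d = {s[high]: 1}
--     for i in range(high - 1, low - 1, -1):
--         ch = s[i]
--         d[ch] = d.get(ch, 0) + 1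
--     return d
-- ===== Notes on version B (the rewrite author's own statement) =====
-- stated objective: simpler
-- what changed: Replaces the right-to-left recursion building the dict on the way back with a single iterative countdown loop: the dict is seeded with the base element {s[high]: 1} and updated via d[ch] = d.get(ch, 0) + 1 over range(high-1, low-1, -1); same O(n) work, no recursion depth.
import Mathlib
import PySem

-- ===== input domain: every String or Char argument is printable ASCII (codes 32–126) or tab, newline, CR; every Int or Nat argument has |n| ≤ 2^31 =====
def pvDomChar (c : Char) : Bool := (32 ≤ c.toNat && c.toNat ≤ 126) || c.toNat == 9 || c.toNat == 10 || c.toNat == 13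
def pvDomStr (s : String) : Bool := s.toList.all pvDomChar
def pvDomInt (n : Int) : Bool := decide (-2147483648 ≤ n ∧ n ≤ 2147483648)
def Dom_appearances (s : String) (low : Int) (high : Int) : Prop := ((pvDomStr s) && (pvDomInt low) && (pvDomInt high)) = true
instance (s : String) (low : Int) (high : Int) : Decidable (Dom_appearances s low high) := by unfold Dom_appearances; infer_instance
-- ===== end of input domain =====

-- B replaces A's right-to-left recursion by a countdown loop seeded with {s[high]: 1} keeping a running count dict (simpler; same O(n) work).

-- ===== PORT A =====
-- s[i] (Pre_ guarantees the index is in range, so the getD default is never used)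
def pvKeyAt (s : String) (i : Int) : String := String.ofList (((PySem.Str.pyGet? s i).map (fun c => [c])).getD [])

-- recursion on the fuel (high - low).toNat; under Pre_ fuel 0 coincides with low == high,
-- and the fuel-exhausted branch (Python: unbounded recursion, RecursionError) is outside Pre_
def appearancesGo (s : String) (high : Int) : Nat → Int → PySem.Dict String Int
  | 0, low =>
    if low == high then PySem.Dict.insert PySem.Dict.empty (pvKeyAt s low) 1
    else PySem.Dict.empty
  | n + 1, low =>
    if low == high then PySem.Dict.insert PySem.Dict.empty (pvKeyAt s low) 1
    else
      let dictionary := appearancesGo s high n (low + 1)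
      if dictionary.contains (pvKeyAt s low) = false then
        dictionary.insert (pvKeyAt s low) 1
      else
        dictionary.modify (pvKeyAt s low) 0 (· + 1)

def appearances (s : String) (low : Int) (high : Int) : List (String × Int) :=
  (appearancesGo s high (high - low).toNat low).items

-- ===== PORT B =====
def appearances_alt (s : String) (low : Int) (high : Int) : List (String × Int) :=
  ((PySem.List.pyRange (high - 1) (low - 1) (-1)).foldl
    (fun d i => d.insert (pvKeyAt s i) (d.getD (pvKeyAt s i) 0 + 1))
    (PySem.Dict.insert PySem.Dict.empty (pvKeyAt s high) 1)).items

-- ===== PRECONDITION & SPEC =====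
-- exactly the inputs on which A returns: low ≤ high (else unbounded recursion) and every accessed index valid (else IndexError)
def Pre_appearances (s : String) (low : Int) (high : Int) : Prop :=
  low ≤ high ∧ -(PySem.Str.len s) ≤ low ∧ high < PySem.Str.len s
instance (s : String) (low : Int) (high : Int) : Decidable (Pre_appearances s low high) := by unfold Pre_appearances; infer_instance

def pvWitness_appearances : String × Int × Int := ("abca", 0, 3)

def Spec_appearances (s : String) (low : Int) (high : Int) (out : List (String × Int)) : Prop := out = appearances_alt s low high
instance (s : String) (low : Int) (high : Int) (out : List (String × Int)) : Decidable (Spec_appearances s low high out) := by unfold Spec_appearances; infer_instance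

-- ===== CLAIM (what is proved, stated in full; the proofs are below) =====
def Claim_equal_appearances : Prop := ∀ (s : String) (low : Int) (high : Int), Dom_appearances s low high → Pre_appearances s low high → Spec_appearances s low high (appearances s low high)

-- ===== LEMMAS AND PROOFS =====

-- A's conditional update is B's unconditional one
lemma step_eq (d : PySem.Dict String Int) (k : String) :
    (if d.contains k = false then d.insert k 1 else d.modify k 0 (· + 1))
      = d.insert k (d.getD k 0 + 1) := by
  by_cases h : d.contains k = false
  · rw [if_pos h, PySem.Dict.getD_of_not_contains d 0 h]
    norm_num
  · rw [if_neg h]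
    rfl

-- the countdown range grows by its last element
lemma range_split (low a : Int) (h : low ≤ a) :
    PySem.List.pyRange a (low - 1) (-1)
      = PySem.List.pyRange a low (-1) ++ [low] := by
  rw [PySem.List.pyRange_neg_one_eq_reverse, PySem.List.pyRange_neg_one_eq_reverse]
  have : low - 1 + 1 = low := by omega
  rw [this]
  rw [PySem.List.pyRange_one_cons (by omega : low < a + 1)]
  simp

-- loop invariant: the recursion equals the countdown fold
lemma go_eq_fold (s : String) (high : Int) :
    ∀ (n : Nat) (low : Int), high - low = (n : Int) →
    appearancesGo s high n low
      = (PySem.List.pyRange (high - 1) (low - 1) (-1)).foldl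
          (fun d i => d.insert (pvKeyAt s i) (d.getD (pvKeyAt s i) 0 + 1))
          (PySem.Dict.insert PySem.Dict.empty (pvKeyAt s high) 1) := by
  intro n
  induction n with
  | zero =>
    intro low hn
    have hlh : low = high := by omega
    rw [hlh, PySem.List.pyRange_neg_one_eq_nil (by omega : high - 1 ≤ high - 1)]
    simp [appearancesGo]
  | succ n ih =>
    intro low hn
    have hlt : low < high := by omega
    rw [range_split low (high - 1) (by omega), List.foldl_append]
    have ih' := ih (low + 1) (by omega)
    rw [show low + 1 - 1 = low from by omega] at ih'
    rw [← ih']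
    simp only [appearancesGo, beq_iff_eq, if_neg (by omega : ¬ low = high),
      List.foldl_cons, List.foldl_nil]
    exact step_eq _ _

-- ===== VERDICT (by name: the statement is the Claim_ definition above) =====
theorem appearances_spec : Claim_equal_appearances := by
  intro s low high _ hpre
  have h1 : low ≤ high := hpre.1
  have hn : high - low = (((high - low).toNat : Nat) : Int) := by omega
  unfold Spec_appearances appearances appearances_alt
  rw [go_eq_fold s high (high - low).toNat low hn]
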